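-- pv_equiv track=rewrite | github.com/UmairHub/LearnGerman | germanTrainer.py | format_explanation
-- ===== SOURCE A (Python) =====
-- def format_explanation(text):
--     """Format explanation text for better readability"""
--     lines = text.split('\n')
--     formatted = []
--     current_section = None
--     example_index = 0
--
--     for line in lines:
--         line = line.strip()
--         if not line:
--             continue
--
--         # Detect section headers
--         if 'EXPLANATION:' in line:
--             if formatted:
--                 formatted.append('')
--             formatted.append('📖 EXPLANATION:')
--             formatted.append('------------------------------------------------------------')
--             current_section = 'explanation'
--             continue
--         elif 'EXAMPLE' in line:
--             formatted.append('')
--             formatted.append(line)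
--             formatted.append('------------------------------------------------------------')
--             current_section = 'example'
--             example_index = 0
--             continue
--
--         # Add proper formatting based on content
--         if current_section == 'explanation':
--             formatted.append('  ' + line)
--         elif current_section == 'example':
--             if line.startswith('DE:'):
--                 line_text = line[3:].strip()
--                 if example_index == 0:
--                     formatted.append('    DE: ' + line_text)
--                 else:
--                     formatted.append('    EN: ' + line_text)
--             elif line.startswith('EN:'):
--                 formatted.append('    EN: ' + line[3:].strip())
--             elif line.startswith('[') and line.endswith(']'):
--                 english = line[1:-1].strip()
--                 formatted.append('    EN: ' + english)
--             else:
--                 if example_index == 0: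
--                     formatted.append('    DE: ' + line)
--                 else:
--                     formatted.append('    EN: ' + line)
--             example_index += 1
--         else:
--             formatted.append(line)
--
--     # Build formatted output without outer borders
--     result = '\n'.join(formatted)
--
--     return result
-- ===== SOURCE B (Python) =====
-- RULE = '-' * 60
--
--
-- def _example_line(line, i):
--     """Render one body line of an EXAMPLE section (i = position in the body)."""
--     if line.startswith('DE:'):
--         t = line[3:].strip()
--         return ('    DE: ' if i == 0 else '    EN: ') + t
--     if line.startswith('EN:'):
--         return '    EN: ' + line[3:].strip()
--     if line.startswith('[') and line.endswith(']'):
--         return '    EN: ' + line[1:-1].strip()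
--     return ('    DE: ' if i == 0 else '    EN: ') + line
--
--
-- def format_explanation(text):
--     """Format explanation text for better readability"""
--     lines = [s for s in (ln.strip() for ln in text.split('\n')) if s]
--
--     # Pass 1: partition into preamble lines and (kind, header, body) sections.
--     pre = []
--     sections = []
--     cur = None
--     for line in lines:
--         if 'EXPLANATION:' in line:
--             if cur is not None:
--                 sections.append(cur)
--             cur = ('explanation', line, [])
--         elif 'EXAMPLE' in line:
--             if cur is not None:
--                 sections.append(cur)
--             cur = ('example', line, [])
--         elif cur is not None:
--             cur[2].append(line)
--         else:
--             pre.append(line)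
--     if cur is not None:
--         sections.append(cur)
--
--     # Pass 2: emit output per section.
--     out = list(pre)
--     for kind, header, body in sections:
--         if kind == 'explanation':
--             if out:
--                 out.append('')
--             out.append('📖 EXPLANATION:')
--             out.append(RULE)
--             out.extend('  ' + b for b in body)
--         else:
--             out.append('')
--             out.append(header)
--             out.append(RULE)
--             out.extend(_example_line(b, i) for i, b in enumerate(body))
--     return '\n'.join(out)
-- ===== Notes on version B (the rewrite author's own statement) =====
-- stated objective: alternative
-- what changed: A interleaves section detection, per-line formatting and the example counter in one stateful loop; B first partitions the stripped non-empty lines into a preamble plus (kind, header, body) sections, then a second pass emits each section (indenting explanation bodies, labeling example body lines by their position).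
import Mathlib
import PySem

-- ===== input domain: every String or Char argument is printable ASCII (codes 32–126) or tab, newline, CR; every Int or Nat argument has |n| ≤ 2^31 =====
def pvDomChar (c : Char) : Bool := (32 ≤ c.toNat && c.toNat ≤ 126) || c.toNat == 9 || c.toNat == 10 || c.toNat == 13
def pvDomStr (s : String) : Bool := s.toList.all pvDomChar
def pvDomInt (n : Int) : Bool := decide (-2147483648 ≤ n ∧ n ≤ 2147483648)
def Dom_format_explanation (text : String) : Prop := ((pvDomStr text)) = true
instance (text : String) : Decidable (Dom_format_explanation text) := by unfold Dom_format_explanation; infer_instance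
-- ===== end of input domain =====

-- B reorganises A's single stateful loop into two passes (partition into sections, then emit);
-- objective: alternative decomposition, same cost.

-- ===== PORT A =====
-- A's loop body after the strip/skip-empty prologue; state (formatted, current_section, example_index)
def pvACore (st : List String × Option String × Int) (line : String) :
    List String × Option String × Int :=
  if PySem.Str.isIn "EXPLANATION:" line then
    ((if st.1 ≠ [] then st.1 ++ [""] else st.1) ++
      ["📖 EXPLANATION:", "------------------------------------------------------------"],
     some "explanation", st.2.2)
  else if PySem.Str.isIn "EXAMPLE" line then
    (st.1 ++ ["", line, "------------------------------------------------------------"],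
     some "example", 0)
  else if st.2.1 = some "explanation" then
    (st.1 ++ ["  " ++ line], st.2.1, st.2.2)
  else if st.2.1 = some "example" then
    (st.1 ++
      [if PySem.Str.startswith line "DE:" then
         (if st.2.2 = 0 then "    DE: " else "    EN: ") ++
           PySem.Str.strip (PySem.Str.slice line (some 3) none)
       else if PySem.Str.startswith line "EN:" then
         "    EN: " ++ PySem.Str.strip (PySem.Str.slice line (some 3) none)
       else if PySem.Str.startswith line "[" && PySem.Str.endswith line "]" then
         "    EN: " ++ PySem.Str.strip (PySem.Str.slice line (some 1) (some (-1)))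
       else
         (if st.2.2 = 0 then "    DE: " else "    EN: ") ++ line],
     st.2.1, st.2.2 + 1)
  else
    (st.1 ++ [line], st.2.1, st.2.2)

def pvAStep (st : List String × Option String × Int) (line0 : String) :
    List String × Option String × Int :=
  let line := PySem.Str.strip line0
  if line = "" then st else pvACore st line

def format_explanation (text : String) : String :=
  let lines := (PySem.Str.split? text "\n").getD []
  let st := lines.foldl pvAStep ([], none, 0)
  PySem.Str.join "\n" st.1

-- ===== PORT B =====
def pvRuleB : String := String.ofList (List.replicate 60 '-')   -- RULE = '-' * 60

def pvExampleLine (line : String) (i : Nat) : String :=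
  if PySem.Str.startswith line "DE:" then
    (if i = 0 then "    DE: " else "    EN: ") ++
      PySem.Str.strip (PySem.Str.slice line (some 3) none)
  else if PySem.Str.startswith line "EN:" then
    "    EN: " ++ PySem.Str.strip (PySem.Str.slice line (some 3) none)
  else if PySem.Str.startswith line "[" && PySem.Str.endswith line "]" then
    "    EN: " ++ PySem.Str.strip (PySem.Str.slice line (some 1) (some (-1)))
  else
    (if i = 0 then "    DE: " else "    EN: ") ++ line

-- pass 1 step: state (pre, sections, cur); a section is (kind, header, body)
def pvPartStep (st : List String × List (String × String × List String) ×
      Option (String × String × List String)) (line : String) :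
    List String × List (String × String × List String) ×
      Option (String × String × List String) :=
  if PySem.Str.isIn "EXPLANATION:" line then
    (st.1, st.2.1 ++ st.2.2.toList, some ("explanation", line, []))
  else if PySem.Str.isIn "EXAMPLE" line then
    (st.1, st.2.1 ++ st.2.2.toList, some ("example", line, []))
  else
    match st.2.2 with
    | some (k, h, b) => (st.1, st.2.1, some (k, h, b ++ [line]))
    | none => (st.1 ++ [line], st.2.1, none)

-- pass 2: emit one section
def pvEmitSec (out : List String) (sec : String × String × List String) : List String :=
  if sec.1 = "explanation" then
    (if out ≠ [] then out ++ [""] else out) ++ ["📖 EXPLANATION:", pvRuleB] ++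
      sec.2.2.map (fun b => "  " ++ b)
  else
    out ++ ["", sec.2.1, pvRuleB] ++ (sec.2.2.zipIdx.map fun p => pvExampleLine p.1 p.2)

def format_explanation_alt (text : String) : String :=
  let lines := (((PySem.Str.split? text "\n").getD []).map PySem.Str.strip).filter (fun s => s ≠ "")
  let P := lines.foldl pvPartStep ([], [], none)
  let sections := P.2.1 ++ P.2.2.toList
  PySem.Str.join "\n" (sections.foldl pvEmitSec P.1)

-- ===== PRECONDITION & SPEC =====
def Spec_format_explanation (text : String) (out : String) : Prop := out = format_explanation_alt text
instance (text : String) (out : String) : Decidable (Spec_format_explanation text out) := by unfold Spec_format_explanation; infer_instance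

-- ===== CLAIM (what is proved, stated in full; the proofs are below) =====
def Claim_equal_format_explanation : Prop := ∀ (text : String), Dom_format_explanation text → Spec_format_explanation text (format_explanation text)

-- ===== LEMMAS AND PROOFS =====

theorem pvRuleB_eq : pvRuleB = "------------------------------------------------------------" := by decide

-- one partition/emit fusion invariant: running A's loop from a state that the pair
-- (pre, secs, cur) emits to, lands on what B's two passes produce from (pre, secs, cur).
theorem pvMain (ls : List String) :
    ∀ (pre : List String) (secs : List (String × String × List String))
      (cur : Option (String × String × List String)) (ei : Int),
      (∀ x, cur = some x → x.1 = "explanation" ∨ x.1 = "example") →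
      (cur = none → secs = []) →
      (∀ h b, cur = some ("example", h, b) → ei = (b.length : Int)) →
      (ls.foldl pvACore ((secs ++ cur.toList).foldl pvEmitSec pre, cur.map (·.1), ei)).1
        = (let P := ls.foldl pvPartStep (pre, secs, cur);
           (P.2.1 ++ P.2.2.toList).foldl pvEmitSec P.1) := by
  induction ls with
  | nil => intro pre secs cur ei _ _ _; simp
  | cons l ls ih =>
    intro pre secs cur ei hk hn he
    simp only [List.foldl_cons]
    by_cases hx : PySem.Str.isIn "EXPLANATION:" l = true
    all_goals simp [PySem.Str.isIn_eq] at hx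
    · have ha : pvACore ((secs ++ cur.toList).foldl pvEmitSec pre, cur.map (·.1), ei) l
          = (((secs ++ cur.toList) ++ [("explanation", l, [])]).foldl pvEmitSec pre,
             some "explanation", ei) := by
        simp [pvACore, pvEmitSec, hx, pvRuleB_eq]
      have hb : pvPartStep (pre, secs, cur) l
          = (pre, secs ++ cur.toList, some ("explanation", l, [])) := by
        simp [pvPartStep, hx]
      rw [ha, hb]
      exact ih pre (secs ++ cur.toList) (some ("explanation", l, [])) ei
        (by rintro x hq; cases hq; left; rfl) (by simp) (by simp)
    · by_cases hy : PySem.Str.isIn "EXAMPLE" l = true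
      all_goals simp [PySem.Str.isIn_eq] at hy
      · have ha : pvACore ((secs ++ cur.toList).foldl pvEmitSec pre, cur.map (·.1), ei) l
            = (((secs ++ cur.toList) ++ [("example", l, [])]).foldl pvEmitSec pre,
               some "example", (0 : Int)) := by
          simp [pvACore, pvEmitSec, hx, hy, pvRuleB_eq]
        have hb : pvPartStep (pre, secs, cur) l
            = (pre, secs ++ cur.toList, some ("example", l, [])) := by
          simp [pvPartStep, hx, hy]
        rw [ha, hb]
        exact ih pre (secs ++ cur.toList) (some ("example", l, [])) (0 : Int)
          (by rintro x hq; cases hq; right; rfl) (by simp) (by rintro h b hq; cases hq; simp)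
      · rcases cur with _ | ⟨k, h, b⟩
        · have hs := hn rfl; subst hs
          simp only [Option.toList_none, List.append_nil, Option.map_none]
          have ha : pvACore (List.foldl pvEmitSec pre [], none, ei) l
              = (pre ++ [l], none, ei) := by
            simp [pvACore, hx, hy]
          have hb : pvPartStep (pre, ([] : List (String × String × List String)), none) l
              = (pre ++ [l], [], none) := by
            simp [pvPartStep, hx, hy]
          rw [ha, hb]
          have := ih (pre ++ [l]) [] none ei (by simp) (by simp) (by simp)
          simpa using this
        ·
          have hk2 := hk ⟨k, h, b⟩ rfl
          rcases hk2 with hke | hke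
          · subst hke
            have ha : pvACore ((secs ++ [("explanation", h, b)]).foldl pvEmitSec pre,
                some "explanation", ei) l
                = ((secs ++ [("explanation", h, b ++ [l])]).foldl pvEmitSec pre,
                   some "explanation", ei) := by
              simp [pvACore, hx, hy, List.foldl_append, pvEmitSec, List.map_append]
            have hb : pvPartStep (pre, secs, some ("explanation", h, b)) l
                = (pre, secs, some ("explanation", h, b ++ [l])) := by
              simp [pvPartStep, hx, hy]
            simp only [Option.toList_some, Option.map_some] at *
            rw [ha, hb]
            exact ih pre secs (some ("explanation", h, b ++ [l])) ei
              (by rintro x hq; cases hq; left; rfl) (by simp) (by simp)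
          · subst hke
            have hei := he _ _ rfl
            have ha : pvACore ((secs ++ [("example", h, b)]).foldl pvEmitSec pre,
                some "example", ei) l
                = ((secs ++ [("example", h, b ++ [l])]).foldl pvEmitSec pre,
                   some "example", ei + 1) := by
              subst hei
              simp [pvACore, hx, hy, List.foldl_append, pvEmitSec, pvExampleLine,
                List.zipIdx_append, List.map_append, Int.natCast_eq_zero]
            have hb : pvPartStep (pre, secs, some ("example", h, b)) l
                = (pre, secs, some ("example", h, b ++ [l])) := by
              simp [pvPartStep, hx, hy]
            simp only [Option.toList_some, Option.map_some] at *
            rw [ha, hb]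
            exact ih pre secs (some ("example", h, b ++ [l])) (ei + 1)
              (by rintro x hq; cases hq; right; rfl) (by simp)
              (by rintro h' b' hq; cases hq; subst hei; simp)

-- ===== VERDICT (by name: the statement is the Claim_ definition above) =====
theorem format_explanation_spec : Claim_equal_format_explanation := by
  intro text _
  simp only [Spec_format_explanation, format_explanation, format_explanation_alt]
  have hsteps : ∀ (lines : List String) (init : List String × Option String × Int),
      lines.foldl pvAStep init
        = ((lines.map PySem.Str.strip).filter (fun s => s ≠ "")).foldl pvACore init := by
    intro lines
    induction lines with
    | nil => intro init; rfl
    | cons x xs ih =>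
      intro init
      by_cases hx : PySem.Str.strip x = "" <;>
        simp [pvAStep, hx, ih]
  rw [hsteps]
  have h2 := pvMain ((((PySem.Str.split? text "\n").getD []).map PySem.Str.strip).filter
      (fun s => s ≠ "")) [] [] none 0 (by simp) (by simp) (by simp)
  refine congrArg (PySem.Str.join "\n") ?_
  simpa using h2
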